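-- pv_equiv track=rewrite | github.com/avogadronuggies/AnalysisOfAlgorithmSEM-IV | EXP8.py | solution_to_fixed_tuple
-- ===== SOURCE A (Python) =====
-- def solution_to_fixed_tuple(solution, weights):
--     fixed_tuple = []
--     for weight in weights:
--         if weight in solution:
--             fixed_tuple.append(1)
--         else:
--             fixed_tuple.append(0)
--     return tuple(fixed_tuple)
-- ===== SOURCE B (Python) =====
-- def solution_to_fixed_tuple(solution, weights):
--     positions = {}
--     for i, w in enumerate(weights):
--         positions.setdefault(w, []).append(i)
--     result = [0] * len(weights)
--     for s in solution:
--         for i in positions.get(s, []):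
--             result[i] = 1
--     return tuple(result)
-- ===== Notes on version B (the rewrite author's own statement) =====
-- stated objective: faster
-- what changed: Replaces the per-weight membership scan of solution with a one-pass value-to-indices dict over weights, then marks positions by scanning solution once.
import Mathlib
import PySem

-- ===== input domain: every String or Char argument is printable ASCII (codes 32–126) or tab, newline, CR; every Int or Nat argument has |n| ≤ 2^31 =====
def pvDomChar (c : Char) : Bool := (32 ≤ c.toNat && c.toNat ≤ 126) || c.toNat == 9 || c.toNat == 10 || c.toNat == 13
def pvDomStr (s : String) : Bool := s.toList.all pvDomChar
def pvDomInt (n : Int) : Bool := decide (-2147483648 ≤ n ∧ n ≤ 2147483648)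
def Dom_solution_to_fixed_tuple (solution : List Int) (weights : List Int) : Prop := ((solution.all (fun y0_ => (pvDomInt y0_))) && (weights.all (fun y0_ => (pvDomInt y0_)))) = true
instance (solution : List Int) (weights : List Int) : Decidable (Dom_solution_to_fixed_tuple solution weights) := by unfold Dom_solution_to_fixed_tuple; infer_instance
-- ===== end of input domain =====

-- B replaces A's per-weight membership scan of `solution` with a value→indices dict built in
-- one pass over `weights`, then marks positions by scanning `solution` once (objective: faster).


-- ===== PORT A =====
-- for weight in weights: fixed_tuple.append(1 if weight in solution else 0); return tuple(fixed_tuple)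
def solution_to_fixed_tuple (solution : List Int) (weights : List Int) : List Int :=
  weights.foldl (fun ft w => if solution.contains w then ft ++ [1] else ft ++ [0]) []

-- ===== PORT B =====
-- positions.setdefault(w, []).append(i) for (i, w) in enumerate(weights)
def pvPositions (weights : List Int) : PySem.Dict Int (List Int) :=
  (PySem.List.enumerate weights 0).foldl
    (fun d p => d.modify p.2 ([] : List Int) (· ++ [p.1])) PySem.Dict.empty

-- result = [0]*len(weights); for s in solution: for i in positions.get(s, []): result[i] = 1
-- (`result[i] = 1` ported as `.set i.toNat 1`: exact here since every stored index comes from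
-- enumerate and is ≥ 0)
def solution_to_fixed_tuple_alt (solution : List Int) (weights : List Int) : List Int :=
  let positions := pvPositions weights
  solution.foldl
    (fun r s => (positions.getD s []).foldl (fun r' i => r'.set i.toNat 1) r)
    (List.replicate weights.length (0 : Int))

-- ===== PRECONDITION & SPEC =====
def Spec_solution_to_fixed_tuple (solution : List Int) (weights : List Int) (out : List Int) : Prop := out = solution_to_fixed_tuple_alt solution weights
instance (solution : List Int) (weights : List Int) (out : List Int) : Decidable (Spec_solution_to_fixed_tuple solution weights out) := by unfold Spec_solution_to_fixed_tuple; infer_instance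

-- ===== CLAIM (what is proved, stated in full; the proofs are below) =====
def Claim_equal_solution_to_fixed_tuple : Prop := ∀ (solution : List Int) (weights : List Int), Dom_solution_to_fixed_tuple solution weights → Spec_solution_to_fixed_tuple solution weights (solution_to_fixed_tuple solution weights)

-- ===== LEMMAS AND PROOFS =====

-- A is the 0/1-indicator map over weights.
theorem portA_eq_map (solution weights : List Int) :
    solution_to_fixed_tuple solution weights
      = weights.map (fun w => if solution.contains w then 1 else 0) := by
  unfold solution_to_fixed_tuple
  have h := PySem.List.foldl_append_singleton_eq_map
    (f := fun w => if solution.contains w then (1:Int) else 0) (l := weights) (acc := [])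
  have h2 : weights.foldl (fun ft w => if solution.contains w then ft ++ [1] else ft ++ [0]) ([] : List Int)
      = weights.foldl (fun acc x => acc ++ [if solution.contains x then (1:Int) else 0]) [] := by
    congr 1; funext ft w; split <;> rfl
  rw [h2, h]; simp

-- The index dict: positions[s] is the list of indices of s in weights, in order.
theorem positions_getD (weights : List Int) (s : Int) :
    (pvPositions weights).getD s []
      = ((PySem.List.enumerate weights 0).filter (fun p => p.2 == s)).map (·.1) := by
  unfold pvPositions
  rw [show (PySem.List.enumerate weights 0).foldl
      (fun d p => d.modify p.2 ([] : List Int) (· ++ [p.1])) PySem.Dict.empty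
    = ((PySem.List.enumerate weights 0).map Prod.swap).foldl
      (fun d p => d.modify p.1 ([] : List Int) (· ++ [p.2])) PySem.Dict.empty from
    (List.foldl_map (f := Prod.swap)
      (g := fun (d : PySem.Dict Int (List Int)) (p : Int × Int) => d.modify p.1 ([] : List Int) (· ++ [p.2]))
      (l := PySem.List.enumerate weights 0) (init := PySem.Dict.empty)).symm]
  rw [PySem.Dict.getD_foldl_modify_append]
  simp [PySem.Dict.getD_empty, List.filter_map, List.map_map, Function.comp_def]

theorem mem_positions_getD (weights : List Int) (s j : Int) :
    j ∈ (pvPositions weights).getD s []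
      ↔ ∃ (k : Nat) (_ : k < weights.length), weights[k] = s ∧ j = (k : Int) := by
  rw [positions_getD]
  simp only [List.mem_map, List.mem_filter, PySem.List.mem_enumerate_iff]
  constructor
  · rintro ⟨p, ⟨⟨k, hk, rfl⟩, hs⟩, rfl⟩
    exact ⟨k, hk, by simpa using hs, by simp⟩
  · rintro ⟨k, hk, hs, rfl⟩
    exact ⟨((k : Int), weights[k]), ⟨⟨k, hk, by simp⟩, by simpa using hs⟩, rfl⟩

theorem mark_length (js l : List Int) :
    (js.foldl (fun r j => r.set j.toNat 1) l).length = l.length := by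
  induction js generalizing l with
  | nil => rfl
  | cons j js ih => simp [List.foldl_cons, ih]

theorem mark_getElem? (js l : List Int) (i : Nat) :
    (js.foldl (fun r j => r.set j.toNat 1) l)[i]?
      = if (∃ j ∈ js, j.toNat = i) ∧ i < l.length then some 1 else l[i]? := by
  induction js generalizing l with
  | nil => simp
  | cons j js ih =>
    rw [List.foldl_cons, ih, List.length_set]
    by_cases hlen : i < l.length
    · by_cases hrest : ∃ j' ∈ js, j'.toNat = i
      · simp [hrest, hlen, List.mem_cons]
      · by_cases hj : j.toNat = i
        · simp [hrest, hlen, hj, List.mem_cons]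
        · simp [hrest, hlen, hj, List.mem_cons]
    · have h1 : ¬((∃ j' ∈ js, j'.toNat = i) ∧ i < l.length) := fun h => hlen h.2
      have h2 : ¬((∃ j' ∈ j :: js, j'.toNat = i) ∧ i < l.length) := fun h => hlen h.2
      rw [if_neg h1, if_neg h2, List.getElem?_set]
      have hn : l[i]? = none := List.getElem?_eq_none (by omega)
      split_ifs with hji hlt
      all_goals first | omega | exact hn.symm | rfl

theorem outer_getElem? (pos : PySem.Dict Int (List Int)) (sol l : List Int) (i : Nat) :
    (sol.foldl (fun r s => (pos.getD s []).foldl (fun r' i => r'.set i.toNat 1) r) l)[i]?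
      = if (∃ s ∈ sol, ∃ j ∈ pos.getD s [], j.toNat = i) ∧ i < l.length then some 1
        else l[i]? := by
  induction sol generalizing l with
  | nil => simp
  | cons s sol ih =>
    rw [List.foldl_cons, ih, mark_length, mark_getElem?]
    by_cases hlen : i < l.length
    · by_cases hrest : ∃ s' ∈ sol, ∃ j ∈ pos.getD s' [], j.toNat = i
      · simp [hrest, hlen, List.mem_cons]
      · by_cases hs : ∃ j ∈ pos.getD s [], j.toNat = i
        · simp [hrest, hlen, hs, List.mem_cons]
        · simp [hrest, hlen, hs, List.mem_cons]
    · have h1 : ∀ (P : Prop), ¬(P ∧ i < l.length) := fun _ h => hlen h.2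
      rw [if_neg (h1 _), if_neg (h1 _), if_neg (h1 _)]

-- ===== VERDICT (by name: the statement is the Claim_ definition above) =====
theorem solution_to_fixed_tuple_spec : Claim_equal_solution_to_fixed_tuple := by
  intro solution weights _
  unfold Spec_solution_to_fixed_tuple
  rw [portA_eq_map]
  unfold solution_to_fixed_tuple_alt
  apply List.ext_getElem?
  intro i
  rw [outer_getElem?]
  simp only [List.length_replicate, List.getElem?_map, List.getElem?_replicate]
  by_cases hi : i < weights.length
  · have hmem : (∃ s ∈ solution, ∃ j ∈ (pvPositions weights).getD s [], j.toNat = i)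
        ↔ weights[i] ∈ solution := by
      simp only [mem_positions_getD]
      constructor
      · rintro ⟨s, hs, j, ⟨k, hk, hks, rfl⟩, hji⟩
        have : k = i := by simpa using hji
        subst this; rw [hks]; exact hs
      · intro h
        exact ⟨weights[i], h, (i : Int), ⟨i, hi, rfl, rfl⟩, by simp⟩
    rw [List.getElem?_eq_getElem hi]
    by_cases hc : weights[i] ∈ solution
    · rw [if_pos ⟨hmem.mpr hc, hi⟩]
      simp [hc]
    · rw [if_neg (fun h => hc (hmem.mp h.1))]
      simp [hi, hc]
  · rw [if_neg (fun h => hi h.2)]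
    simp [hi]
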